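-- pv_equiv track=rewrite | github.com/kamnasjey/JKM-AI-BOT | engine/utils/reason_codes.py | normalize_pair_none_reason
-- ===== SOURCE A (Python) =====
-- from typing import Any, Dict, Iterable, List, Optional
--
-- _ALIAS_TO_STABLE = {
--     # Governance
--     "COOLDOWN_BLOCK": "COOLDOWN_ACTIVE",
--     "COOLDOWN_ACTIVE": "COOLDOWN_ACTIVE",
--     "DAILY_LIMIT_BLOCK": "DAILY_LIMIT_REACHED",
--     "DAILY_LIMIT_REACHED": "DAILY_LIMIT_REACHED",
--     "daily_limit": "DAILY_LIMIT_REACHED",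
--
--     # Engine / detector outcome
--     "no_match": "NO_HITS",
--     "NO_SIGNALS_FROM_DETECTORS": "NO_HITS",
--     "NO_HITS": "NO_HITS",
--     "NO_DETECTORS_FOR_REGIME": "NO_DETECTORS_FOR_REGIME",
--
--     # Score/quality gates
--     "low_score": "SCORE_BELOW_MIN",
--     "SCORE_BELOW_MIN": "SCORE_BELOW_MIN",
--     "conflict": "CONFLICT_SCORE",
--     "CONFLICT_SCORE": "CONFLICT_SCORE",
--     "RR_BELOW_MIN": "RR_BELOW_MIN",
--
--     # Validation
--     "PROFILE_INVALID": "PROFILE_INVALID",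
--     "STRATEGY_INVALID": "STRATEGY_INVALID",
--
--     # Generic fallbacks / non-stable internal reasons
--     "data_gap": "UNKNOWN_ERROR",
--     "no_m5": "UNKNOWN_ERROR",
-- }
--
-- _PRIORITY = [
--     "PROFILE_INVALID",
--     "STRATEGY_INVALID",
--     "NO_DETECTORS_FOR_REGIME",
--     "NO_HITS",
--     "SCORE_BELOW_MIN",
--     "RR_BELOW_MIN",
--     "COOLDOWN_ACTIVE",
--     "DAILY_LIMIT_REACHED",
--     "CONFLICT_SCORE",
--     "UNKNOWN_ERROR",
-- ]
--
-- def normalize_pair_none_reason(reasons: Optional[List[str]]) -> str: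
--     """Map internal reason strings to stable PAIR_NONE reason codes.
--
--     Outputs are restricted to `STABLE_PAIR_NONE_REASONS`.
--     Legacy/internal strings are accepted as input aliases only.
--     """
--     if not isinstance(reasons, list) or not reasons:
--         return "NO_HITS"
--
--     mapped: List[str] = []
--     for r in reasons:
--         if r is None:
--             continue
--         s = str(r)
--
--         # Normalize SCORE_BELOW_MIN|x<y => SCORE_BELOW_MIN
--         if s.startswith("SCORE_BELOW_MIN"):
--             s = "SCORE_BELOW_MIN"
--
--         mapped.append(_ALIAS_TO_STABLE.get(s, s))
--
--     # Special preference: if NO_HITS appears anywhere, treat as NO_HITS.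
--     if "NO_HITS" in mapped:
--         return "NO_HITS"
--
--     for p in _PRIORITY:
--         if p in mapped:
--             return p
--
--     # Final safety: never emit unknown outputs.
--     return "UNKNOWN_ERROR"
-- ===== SOURCE B (Python) =====
-- _ALIAS_TO_STABLE = {
--     "COOLDOWN_BLOCK": "COOLDOWN_ACTIVE",
--     "COOLDOWN_ACTIVE": "COOLDOWN_ACTIVE",
--     "DAILY_LIMIT_BLOCK": "DAILY_LIMIT_REACHED",
--     "DAILY_LIMIT_REACHED": "DAILY_LIMIT_REACHED",
--     "daily_limit": "DAILY_LIMIT_REACHED",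
--     "no_match": "NO_HITS",
--     "NO_SIGNALS_FROM_DETECTORS": "NO_HITS",
--     "NO_HITS": "NO_HITS",
--     "NO_DETECTORS_FOR_REGIME": "NO_DETECTORS_FOR_REGIME",
--     "low_score": "SCORE_BELOW_MIN",
--     "SCORE_BELOW_MIN": "SCORE_BELOW_MIN",
--     "conflict": "CONFLICT_SCORE",
--     "CONFLICT_SCORE": "CONFLICT_SCORE",
--     "RR_BELOW_MIN": "RR_BELOW_MIN",
--     "PROFILE_INVALID": "PROFILE_INVALID",
--     "STRATEGY_INVALID": "STRATEGY_INVALID",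
--     "data_gap": "UNKNOWN_ERROR",
--     "no_m5": "UNKNOWN_ERROR",
-- }
--
-- _PRIORITY = [
--     "PROFILE_INVALID",
--     "STRATEGY_INVALID",
--     "NO_DETECTORS_FOR_REGIME",
--     "NO_HITS",
--     "SCORE_BELOW_MIN",
--     "RR_BELOW_MIN",
--     "COOLDOWN_ACTIVE",
--     "DAILY_LIMIT_REACHED",
--     "CONFLICT_SCORE",
--     "UNKNOWN_ERROR",
-- ]
--
-- _RANK = {c: i for i, c in enumerate(_PRIORITY)}
--
--
-- def normalize_pair_none_reason(reasons):
--     """Single pass: track NO_HITS flag and the minimum priority rank seen."""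
--     if not isinstance(reasons, list) or not reasons:
--         return "NO_HITS"
--     saw_no_hits = False
--     best = None
--     for r in reasons:
--         if r is None:
--             continue
--         s = str(r)
--         if s.startswith("SCORE_BELOW_MIN"):
--             s = "SCORE_BELOW_MIN"
--         code = _ALIAS_TO_STABLE.get(s, s)
--         if code == "NO_HITS":
--             saw_no_hits = True
--         else:
--             k = _RANK.get(code)
--             if k is not None and (best is None or k < best):
--                 best = k
--     if saw_no_hits:
--         return "NO_HITS"
--     if best is not None:
--         return _PRIORITY[best]
--     return "UNKNOWN_ERROR"
-- ===== Notes on version B (the rewrite author's own statement) =====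
-- stated objective: alternative
-- what changed: B replaces A's two-phase build-a-mapped-list-then-scan-_PRIORITY algorithm with a single fold over reasons that tracks a NO_HITS flag and the minimum priority rank (via a precomputed code-to-rank dict), indexing _PRIORITY once at the end.
import Mathlib
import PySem

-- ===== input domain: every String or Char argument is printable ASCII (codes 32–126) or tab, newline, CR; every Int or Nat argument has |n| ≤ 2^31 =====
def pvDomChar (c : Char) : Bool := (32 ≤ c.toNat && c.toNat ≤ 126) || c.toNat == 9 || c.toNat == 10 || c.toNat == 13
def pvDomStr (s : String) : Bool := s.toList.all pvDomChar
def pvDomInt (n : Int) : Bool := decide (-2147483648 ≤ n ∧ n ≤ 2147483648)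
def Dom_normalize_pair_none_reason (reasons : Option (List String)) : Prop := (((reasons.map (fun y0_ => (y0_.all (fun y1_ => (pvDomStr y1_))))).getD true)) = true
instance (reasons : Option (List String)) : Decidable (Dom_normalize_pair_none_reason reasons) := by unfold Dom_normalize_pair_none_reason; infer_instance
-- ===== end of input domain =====

-- B replaces A's mapped-list-then-priority-scan with a single fold over `reasons`
-- tracking a NO_HITS flag and the minimum priority rank (objective: alternative decomposition).

-- ===== PORT A =====
-- module constant _ALIAS_TO_STABLE (shared data of the module, used by both versions)
def pvAlias : PySem.Dict String String := PySem.Dict.mk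
  [("COOLDOWN_BLOCK", "COOLDOWN_ACTIVE"),
   ("COOLDOWN_ACTIVE", "COOLDOWN_ACTIVE"),
   ("DAILY_LIMIT_BLOCK", "DAILY_LIMIT_REACHED"),
   ("DAILY_LIMIT_REACHED", "DAILY_LIMIT_REACHED"),
   ("daily_limit", "DAILY_LIMIT_REACHED"),
   ("no_match", "NO_HITS"),
   ("NO_SIGNALS_FROM_DETECTORS", "NO_HITS"),
   ("NO_HITS", "NO_HITS"),
   ("NO_DETECTORS_FOR_REGIME", "NO_DETECTORS_FOR_REGIME"),
   ("low_score", "SCORE_BELOW_MIN"),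
   ("SCORE_BELOW_MIN", "SCORE_BELOW_MIN"),
   ("conflict", "CONFLICT_SCORE"),
   ("CONFLICT_SCORE", "CONFLICT_SCORE"),
   ("RR_BELOW_MIN", "RR_BELOW_MIN"),
   ("PROFILE_INVALID", "PROFILE_INVALID"),
   ("STRATEGY_INVALID", "STRATEGY_INVALID"),
   ("data_gap", "UNKNOWN_ERROR"),
   ("no_m5", "UNKNOWN_ERROR")]

-- module constant _PRIORITY (shared data of the module)
def pvPriority : List String :=
  ["PROFILE_INVALID", "STRATEGY_INVALID", "NO_DETECTORS_FOR_REGIME", "NO_HITS",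
   "SCORE_BELOW_MIN", "RR_BELOW_MIN", "COOLDOWN_ACTIVE", "DAILY_LIMIT_REACHED",
   "CONFLICT_SCORE", "UNKNOWN_ERROR"]

-- A's second loop: `for p in _PRIORITY: if p in mapped: return p` then `return "UNKNOWN_ERROR"`
def pvScanA : List String → List String → String
  | [], _ => "UNKNOWN_ERROR"
  | p :: ps, mapped => if mapped.contains p then p else pvScanA ps mapped

def normalize_pair_none_reason (reasons : Option (List String)) : String :=
  match reasons with
  | none => "NO_HITS"          -- not a list → "NO_HITS"
  | some rs =>
    if rs.isEmpty then "NO_HITS"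
    else
      -- mapped = []; for r in reasons: … mapped.append(_ALIAS_TO_STABLE.get(s, s))
      -- (elements are strings, so the `r is None: continue` branch never fires)
      let mapped : List String := rs.foldl (fun acc r =>
        let s := r
        let s := if PySem.Str.startswith s "SCORE_BELOW_MIN" then "SCORE_BELOW_MIN" else s
        acc ++ [PySem.Dict.getD pvAlias s s]) []
      if mapped.contains "NO_HITS" then "NO_HITS"
      else pvScanA pvPriority mapped

-- ===== PORT B =====
-- _RANK = {c: i for i, c in enumerate(_PRIORITY)}
def pvRank : PySem.Dict String Int :=
  (PySem.List.enumerate pvPriority).foldl (fun d ic => d.insert ic.2 ic.1) PySem.Dict.empty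

def normalize_pair_none_reason_alt (reasons : Option (List String)) : String :=
  match reasons with
  | none => "NO_HITS"
  | some rs =>
    if rs.isEmpty then "NO_HITS"
    else
      -- single pass: state = (saw_no_hits, best)
      let st : Bool × Option Int := rs.foldl (fun (st : Bool × Option Int) r =>
        let s := r
        let s := if PySem.Str.startswith s "SCORE_BELOW_MIN" then "SCORE_BELOW_MIN" else s
        let code := PySem.Dict.getD pvAlias s s
        if code == "NO_HITS" then (true, st.2)
        else
          match PySem.Dict.get? pvRank code with
          | none => st
          | some k =>
            match st.2 with
            | none => (st.1, some k)
            | some b => if k < b then (st.1, some k) else st) (false, none)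
      if st.1 then "NO_HITS"
      else
        match st.2 with
        | some k => (PySem.List.pyGet? pvPriority k).getD "UNKNOWN_ERROR"  -- best is always a valid index, so _PRIORITY[best] never raises
        | none => "UNKNOWN_ERROR"

-- ===== PRECONDITION & SPEC =====
def Spec_normalize_pair_none_reason (reasons : Option (List String)) (out : String) : Prop := out = normalize_pair_none_reason_alt reasons
instance (reasons : Option (List String)) (out : String) : Decidable (Spec_normalize_pair_none_reason reasons out) := by unfold Spec_normalize_pair_none_reason; infer_instance

-- ===== CLAIM (what is proved, stated in full; the proofs are below) =====
def Claim_equal_normalize_pair_none_reason : Prop := ∀ (reasons : Option (List String)), Dom_normalize_pair_none_reason reasons → Spec_normalize_pair_none_reason reasons (normalize_pair_none_reason reasons)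

-- ===== LEMMAS AND PROOFS =====

-- the common per-element normalisation
def pvNorm (r : String) : String :=
  let s := if PySem.Str.startswith r "SCORE_BELOW_MIN" then "SCORE_BELOW_MIN" else r
  PySem.Dict.getD pvAlias s s

def pvRnk (c : String) : Option Int := PySem.Dict.get? pvRank c

def pvOmin : Option Int → Option Int → Option Int
  | none, b => b
  | some a, none => some a
  | some a, some b => some (min a b)

-- minimum rank over the mapped codes, skipping "NO_HITS" (as B's loop does)
def pvMin : List String → Option Int
  | [] => none
  | c :: t => if c = "NO_HITS" then pvMin t else pvOmin (pvRnk c) (pvMin t)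

def pvOut : Option Int → String
  | some k => (PySem.List.pyGet? pvPriority k).getD "UNKNOWN_ERROR"
  | none => "UNKNOWN_ERROR"

-- B's loop body, abstractly
def pvStepB (st : Bool × Option Int) (r : String) : Bool × Option Int :=
  if pvNorm r = "NO_HITS" then (true, st.2)
  else
    match pvRnk (pvNorm r) with
    | none => st
    | some k =>
      match st.2 with
      | none => (st.1, some k)
      | some b => if k < b then (st.1, some k) else st

lemma pvStepB_eq :
    (fun (st : Bool × Option Int) r =>
        let s := r
        let s := if PySem.Str.startswith s "SCORE_BELOW_MIN" then "SCORE_BELOW_MIN" else s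
        let code := PySem.Dict.getD pvAlias s s
        if code == "NO_HITS" then (true, st.2)
        else
          match PySem.Dict.get? pvRank code with
          | none => st
          | some k =>
            match st.2 with
            | none => (st.1, some k)
            | some b => if k < b then (st.1, some k) else st) = pvStepB := by
  funext st r
  show (if (pvNorm r == "NO_HITS") = true then (true, st.2)
        else
          match pvRnk (pvNorm r) with
          | none => st
          | some k =>
            match st.2 with
            | none => (st.1, some k)
            | some b => if k < b then (st.1, some k) else st) = pvStepB st r
  by_cases h : pvNorm r = "NO_HITS"
  · simp [pvStepB, h]
  · rw [if_neg (by simpa using h), pvStepB, if_neg h]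

lemma pvOmin_assoc (a b c : Option Int) : pvOmin (pvOmin a b) c = pvOmin a (pvOmin b c) := by
  cases a <;> cases b <;> cases c <;> simp [pvOmin, min_assoc]

lemma pvStepB_of_ne (st : Bool × Option Int) (r : String) (h : pvNorm r ≠ "NO_HITS") :
    pvStepB st r = (st.1, pvOmin st.2 (pvRnk (pvNorm r))) := by
  rw [pvStepB, if_neg h]
  cases hr : pvRnk (pvNorm r) with
  | none => cases st with | mk a b => cases b <;> simp [pvOmin]
  | some k =>
    cases hst : st.2 with
    | none => simp [pvOmin]
    | some b =>
      by_cases hk : k < b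
      · simp [hk, pvOmin, min_eq_right (le_of_lt hk)]
      · cases st with | mk a o =>
          simp only at hst; subst hst
          simp [hk, pvOmin, min_eq_left (not_lt.mp hk)]

lemma pvMapped_eq (rs : List String) (acc : List String) :
    rs.foldl (fun acc r =>
      let s := r
      let s := if PySem.Str.startswith s "SCORE_BELOW_MIN" then "SCORE_BELOW_MIN" else s
      acc ++ [PySem.Dict.getD pvAlias s s]) acc = acc ++ rs.map pvNorm := by
  induction rs generalizing acc with
  | nil => simp
  | cons r t ih =>
    rw [List.foldl_cons]
    show List.foldl _ (acc ++ [pvNorm r]) t = acc ++ List.map pvNorm (r :: t)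
    rw [ih]
    simp

lemma pvFoldB_eq (rs : List String) (b : Bool) (o : Option Int) :
    rs.foldl pvStepB (b, o)
      = ((b || (rs.map pvNorm).contains "NO_HITS"), pvOmin o (pvMin (rs.map pvNorm))) := by
  induction rs generalizing b o with
  | nil => cases o <;> simp [pvMin, pvOmin]
  | cons r t ih =>
    rw [List.foldl_cons, List.map_cons]
    by_cases hnh : pvNorm r = "NO_HITS"
    · rw [pvStepB, if_pos hnh, ih]
      simp [hnh, pvMin]

    · rw [pvStepB_of_ne _ _ hnh, ih]
      have hb : (pvNorm r == "NO_HITS") = false := by simpa using hnh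
      have h1 : (pvNorm r :: t.map pvNorm).contains "NO_HITS" = (t.map pvNorm).contains "NO_HITS" := by
        rw [List.contains_cons,
          show (("NO_HITS" : String) == pvNorm r) = false from
            beq_eq_false_iff_ne.mpr (fun h => hnh h.symm), Bool.false_or]
      have h2 : pvMin (pvNorm r :: t.map pvNorm) = pvOmin (pvRnk (pvNorm r)) (pvMin (t.map pvNorm)) := by
        rw [pvMin, if_neg hnh]
      rw [h1, h2, ← pvOmin_assoc]

lemma pvRnk_cases (c : String) (k : Int) (h : pvRnk c = some k) :
    (c = "PROFILE_INVALID" ∧ k = 0) ∨ (c = "STRATEGY_INVALID" ∧ k = 1) ∨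
    (c = "NO_DETECTORS_FOR_REGIME" ∧ k = 2) ∨ (c = "NO_HITS" ∧ k = 3) ∨
    (c = "SCORE_BELOW_MIN" ∧ k = 4) ∨ (c = "RR_BELOW_MIN" ∧ k = 5) ∨
    (c = "COOLDOWN_ACTIVE" ∧ k = 6) ∨ (c = "DAILY_LIMIT_REACHED" ∧ k = 7) ∨
    (c = "CONFLICT_SCORE" ∧ k = 8) ∨ (c = "UNKNOWN_ERROR" ∧ k = 9) := by
  have hr : pvRank = PySem.Dict.mk
      [("PROFILE_INVALID", 0), ("STRATEGY_INVALID", 1), ("NO_DETECTORS_FOR_REGIME", 2),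
       ("NO_HITS", 3), ("SCORE_BELOW_MIN", 4), ("RR_BELOW_MIN", 5), ("COOLDOWN_ACTIVE", 6),
       ("DAILY_LIMIT_REACHED", 7), ("CONFLICT_SCORE", 8), ("UNKNOWN_ERROR", 9)] := by decide
  unfold pvRnk at h
  rw [hr] at h
  simp only [PySem.Dict.get?_mk_cons, beq_iff_eq] at h
  split_ifs at h with h0 h1 h2 h3 h4 h5 h6 h7 h8 h9 <;> simp_all [PySem.Dict.get?]

lemma pvRnk_none (c : String) (h : pvRnk c = none) : ∀ p ∈ pvPriority, p ≠ c := by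
  intro p hp
  have hr : pvRank = PySem.Dict.mk
      [("PROFILE_INVALID", 0), ("STRATEGY_INVALID", 1), ("NO_DETECTORS_FOR_REGIME", 2),
       ("NO_HITS", 3), ("SCORE_BELOW_MIN", 4), ("RR_BELOW_MIN", 5), ("COOLDOWN_ACTIVE", 6),
       ("DAILY_LIMIT_REACHED", 7), ("CONFLICT_SCORE", 8), ("UNKNOWN_ERROR", 9)] := by decide
  unfold pvRnk at h
  rw [hr] at h
  simp only [PySem.Dict.get?_mk_cons, beq_iff_eq] at h
  split_ifs at h with h0 h1 h2 h3 h4 h5 h6 h7 h8 h9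
  simp only [pvPriority, List.mem_cons, List.not_mem_nil, or_false] at hp
  rcases hp with rfl | rfl | rfl | rfl | rfl | rfl | rfl | rfl | rfl | rfl <;> tauto

lemma pvMin_none (m : List String) (h : pvMin m = none) :
    ∀ c ∈ m, pvRnk c = none ∨ c = "NO_HITS" := by
  induction m with
  | nil => simp
  | cons c t ih =>
    intro x hx
    by_cases hc : c = "NO_HITS"
    · rw [pvMin, if_pos hc] at h
      rcases List.mem_cons.mp hx with rfl | hx
      · exact Or.inr hc
      · exact ih h x hx
    · rw [pvMin, if_neg hc] at h
      have h1 : pvRnk c = none ∧ pvMin t = none := by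
        cases hr : pvRnk c <;> cases hm : pvMin t <;> simp [hr, hm, pvOmin] at h ⊢
      rcases List.mem_cons.mp hx with rfl | hx
      · exact Or.inl h1.1
      · exact ih h1.2 x hx

lemma pvMin_some (m : List String) (k : Int) (h : pvMin m = some k) :
    (∃ c ∈ m, c ≠ "NO_HITS" ∧ pvRnk c = some k) ∧
    (∀ c ∈ m, c ≠ "NO_HITS" → ∀ j, pvRnk c = some j → k ≤ j) := by
  induction m generalizing k with
  | nil => simp [pvMin] at h
  | cons c t ih =>
    by_cases hc : c = "NO_HITS"
    · rw [pvMin, if_pos hc] at h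
      obtain ⟨⟨c', hc', hcn, hck⟩, hmin⟩ := ih k h
      refine ⟨⟨c', List.mem_cons_of_mem _ hc', hcn, hck⟩, ?_⟩
      intro x hx hxn j hj
      rcases List.mem_cons.mp hx with rfl | hx
      · exact absurd hc hxn
      · exact hmin x hx hxn j hj
    · rw [pvMin, if_neg hc] at h
      cases hr : pvRnk c with
      | none =>
        rw [hr] at h
        simp only [pvOmin] at h
        obtain ⟨⟨c', hc', hcn, hck⟩, hmin⟩ := ih k h
        refine ⟨⟨c', List.mem_cons_of_mem _ hc', hcn, hck⟩, ?_⟩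
        intro x hx hxn j hj
        rcases List.mem_cons.mp hx with rfl | hx
        · rw [hr] at hj; exact absurd hj (by simp)
        · exact hmin x hx hxn j hj
      | some a =>
        rw [hr] at h
        cases hm : pvMin t with
        | none =>
          rw [hm] at h
          simp only [pvOmin, Option.some.injEq] at h
          subst h
          refine ⟨⟨c, List.mem_cons_self, hc, hr⟩, ?_⟩
          intro x hx hxn j hj
          rcases List.mem_cons.mp hx with rfl | hx
          · rw [hr] at hj
            simp only [Option.some.injEq] at hj
            omega
          · rcases pvMin_none t hm x hx with hn | hn
            · rw [hn] at hj; exact absurd hj (by simp)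
            · exact absurd hn hxn
        | some b =>
          rw [hm] at h
          simp only [pvOmin, Option.some.injEq] at h
          obtain ⟨⟨c', hc', hcn, hck⟩, hmin⟩ := ih b hm
          refine ⟨?_, ?_⟩
          · rcases le_total a b with hab | hab
            · exact ⟨c, List.mem_cons_self, hc, by rw [hr]; congr 1; omega⟩
            · exact ⟨c', List.mem_cons_of_mem _ hc', hcn, by rw [hck]; congr 1; omega⟩
          · intro x hx hxn j hj
            rcases List.mem_cons.mp hx with rfl | hx
            · rw [hr] at hj
              simp only [Option.some.injEq] at hj
              omega
            · have := hmin x hx hxn j hj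
              omega

-- rank of each literal priority string
lemma pvRnk_lit0 : pvRnk "PROFILE_INVALID" = some 0 := by decide
lemma pvRnk_lit1 : pvRnk "STRATEGY_INVALID" = some 1 := by decide
lemma pvRnk_lit2 : pvRnk "NO_DETECTORS_FOR_REGIME" = some 2 := by decide
lemma pvRnk_lit4 : pvRnk "SCORE_BELOW_MIN" = some 4 := by decide
lemma pvRnk_lit5 : pvRnk "RR_BELOW_MIN" = some 5 := by decide
lemma pvRnk_lit6 : pvRnk "COOLDOWN_ACTIVE" = some 6 := by decide
lemma pvRnk_lit7 : pvRnk "DAILY_LIMIT_REACHED" = some 7 := by decide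
lemma pvRnk_lit8 : pvRnk "CONFLICT_SCORE" = some 8 := by decide

-- A's priority scan returns the code of minimal rank
lemma pvScan_eq_out (m : List String) (hnh : ¬ "NO_HITS" ∈ m) :
    pvScanA pvPriority m = pvOut (pvMin m) := by
  cases hmin : pvMin m with
  | none =>
    have hnone := pvMin_none m hmin
    have hnot : ∀ p ∈ pvPriority, ¬ p ∈ m := by
      intro p hp hpm
      rcases hnone p hpm with h | h
      · exact (pvRnk_none p h p hp) rfl
      · exact hnh (h ▸ hpm)
    have l0 := hnot "PROFILE_INVALID" (by simp [pvPriority])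
    have l1 := hnot "STRATEGY_INVALID" (by simp [pvPriority])
    have l2 := hnot "NO_DETECTORS_FOR_REGIME" (by simp [pvPriority])
    have l4 := hnot "SCORE_BELOW_MIN" (by simp [pvPriority])
    have l5 := hnot "RR_BELOW_MIN" (by simp [pvPriority])
    have l6 := hnot "COOLDOWN_ACTIVE" (by simp [pvPriority])
    have l7 := hnot "DAILY_LIMIT_REACHED" (by simp [pvPriority])
    have l8 := hnot "CONFLICT_SCORE" (by simp [pvPriority])
    have l9 := hnot "UNKNOWN_ERROR" (by simp [pvPriority])
    simp [pvScanA, pvPriority, pvOut, List.contains_eq_mem, l0, l1, l2, hnh, l4, l5, l6, l7, l8, l9]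
  | some k =>
    obtain ⟨⟨c, hcm, hcn, hck⟩, hmin'⟩ := pvMin_some m k hmin
    have hnotlt : ∀ (p : String) (j : Int), pvRnk p = some j → j < k → ¬ p ∈ m := by
      intro p j hr hj hpm
      by_cases hp : p = "NO_HITS"
      · exact hnh (hp ▸ hpm)
      · exact absurd (hmin' p hpm hp j hr) (by omega)
    rcases pvRnk_cases c k hck with
      ⟨rfl, rfl⟩ | ⟨rfl, rfl⟩ | ⟨rfl, rfl⟩ | ⟨rfl, rfl⟩ | ⟨rfl, rfl⟩ |
      ⟨rfl, rfl⟩ | ⟨rfl, rfl⟩ | ⟨rfl, rfl⟩ | ⟨rfl, rfl⟩ | ⟨rfl, rfl⟩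
    · simp [pvScanA, pvPriority, pvOut, List.contains_eq_mem, hcm]
    · simp [pvScanA, pvPriority, pvOut, List.contains_eq_mem, hcm,
        hnotlt _ _ pvRnk_lit0 (by norm_num)]
    · simp [pvScanA, pvPriority, pvOut, List.contains_eq_mem, hcm,
        hnotlt _ _ pvRnk_lit0 (by norm_num), hnotlt _ _ pvRnk_lit1 (by norm_num)]
    · exact absurd rfl hcn
    · simp [pvScanA, pvPriority, pvOut, List.contains_eq_mem, hcm,
        hnotlt _ _ pvRnk_lit0 (by norm_num), hnotlt _ _ pvRnk_lit1 (by norm_num),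
        hnotlt _ _ pvRnk_lit2 (by norm_num), hnh]
    · simp [pvScanA, pvPriority, pvOut, List.contains_eq_mem, hcm,
        hnotlt _ _ pvRnk_lit0 (by norm_num), hnotlt _ _ pvRnk_lit1 (by norm_num),
        hnotlt _ _ pvRnk_lit2 (by norm_num), hnh, hnotlt _ _ pvRnk_lit4 (by norm_num)]
    · simp [pvScanA, pvPriority, pvOut, List.contains_eq_mem, hcm,
        hnotlt _ _ pvRnk_lit0 (by norm_num), hnotlt _ _ pvRnk_lit1 (by norm_num),
        hnotlt _ _ pvRnk_lit2 (by norm_num), hnh, hnotlt _ _ pvRnk_lit4 (by norm_num),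
        hnotlt _ _ pvRnk_lit5 (by norm_num)]
    · simp [pvScanA, pvPriority, pvOut, List.contains_eq_mem, hcm,
        hnotlt _ _ pvRnk_lit0 (by norm_num), hnotlt _ _ pvRnk_lit1 (by norm_num),
        hnotlt _ _ pvRnk_lit2 (by norm_num), hnh, hnotlt _ _ pvRnk_lit4 (by norm_num),
        hnotlt _ _ pvRnk_lit5 (by norm_num), hnotlt _ _ pvRnk_lit6 (by norm_num)]
    · simp [pvScanA, pvPriority, pvOut, List.contains_eq_mem, hcm,
        hnotlt _ _ pvRnk_lit0 (by norm_num), hnotlt _ _ pvRnk_lit1 (by norm_num),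
        hnotlt _ _ pvRnk_lit2 (by norm_num), hnh, hnotlt _ _ pvRnk_lit4 (by norm_num),
        hnotlt _ _ pvRnk_lit5 (by norm_num), hnotlt _ _ pvRnk_lit6 (by norm_num),
        hnotlt _ _ pvRnk_lit7 (by norm_num)]
    · simp [pvScanA, pvPriority, pvOut, List.contains_eq_mem, hcm,
        hnotlt _ _ pvRnk_lit0 (by norm_num), hnotlt _ _ pvRnk_lit1 (by norm_num),
        hnotlt _ _ pvRnk_lit2 (by norm_num), hnh, hnotlt _ _ pvRnk_lit4 (by norm_num),
        hnotlt _ _ pvRnk_lit5 (by norm_num), hnotlt _ _ pvRnk_lit6 (by norm_num),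
        hnotlt _ _ pvRnk_lit7 (by norm_num), hnotlt _ _ pvRnk_lit8 (by norm_num)]

-- ===== VERDICT (by name: the statement is the Claim_ definition above) =====
theorem normalize_pair_none_reason_spec : Claim_equal_normalize_pair_none_reason := by
  intro reasons _
  unfold Spec_normalize_pair_none_reason
  unfold normalize_pair_none_reason normalize_pair_none_reason_alt
  cases reasons with
  | none => rfl
  | some rs =>
    by_cases he : rs.isEmpty
    · simp [he]
    · simp only [he, if_false, Bool.false_eq_true]
      rw [pvMapped_eq, pvStepB_eq, pvFoldB_eq]
      simp only [List.nil_append, Bool.false_or]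
      by_cases hnh : ("NO_HITS" : String) ∈ rs.map pvNorm
      · simp [List.contains_eq_mem, hnh]
      · have hc : (rs.map pvNorm).contains "NO_HITS" = false := by
          simp [List.contains_eq_mem, hnh]
        rw [hc]
        simp only [Bool.false_eq_true, if_false]
        rw [pvScan_eq_out _ hnh]
        cases pvMin (rs.map pvNorm) with
        | none => simp [pvOut, pvOmin]
        | some k => simp [pvOut, pvOmin]
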